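-- pv_equiv track=rewrite | github.com/AbhinavGor/CSE573-Group27-Text2SQL | code/backend/api.py | _extract_paren_groups
-- ===== SOURCE A (Python) =====
-- def _extract_paren_groups(text: str) -> list[str]:
--     groups: list[str] = []
--     depth = 0
--     start = -1
--     in_single_quote = False
--     in_double_quote = False
--     in_backtick_quote = False
--
--     for idx, ch in enumerate(text):
--         if ch == "'" and not in_double_quote and not in_backtick_quote:
--             in_single_quote = not in_single_quote
--         elif ch == '"' and not in_single_quote and not in_backtick_quote:
--             in_double_quote = not in_double_quote
--         elif ch == "`" and not in_single_quote and not in_double_quote: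
--             in_backtick_quote = not in_backtick_quote
--
--         if in_single_quote or in_double_quote or in_backtick_quote:
--             continue
--
--         if ch == "(":
--             if depth == 0:
--                 start = idx + 1
--             depth += 1
--         elif ch == ")":
--             depth -= 1
--             if depth == 0 and start >= 0:
--                 groups.append(text[start:idx])
--                 start = -1
--     return groups
-- ===== SOURCE B (Python) =====
-- def _extract_paren_groups(text: str) -> list[str]:
--     # Collect the unquoted paren events, then compute the depth profile's
--     # 0->1 crossing indices (openers) and 1->0 crossing indices (closers)
--     # and pair them up by zip; each pair delimits one top-level group.
--     in_s = in_d = in_b = False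
--     events = []
--     for idx, ch in enumerate(text):
--         if ch == "'" and not in_d and not in_b:
--             in_s = not in_s
--         elif ch == '"' and not in_s and not in_b:
--             in_d = not in_d
--         elif ch == "`" and not in_s and not in_d:
--             in_b = not in_b
--         if in_s or in_d or in_b:
--             continue
--         if ch == "(":
--             events.append((idx, 1))
--         elif ch == ")":
--             events.append((idx, -1))
--     openers = []
--     closers = []
--     depth = 0
--     for idx, delta in events:
--         if delta == 1 and depth == 0:
--             openers.append(idx)
--         depth += delta
--         if delta == -1 and depth == 0:
--             closers.append(idx)
--     return [text[o + 1:c] for o, c in zip(openers, closers)]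
-- ===== Notes on version B (the rewrite author's own statement) =====
-- stated objective: alternative
-- what changed: Instead of A's interleaved state machine with a mutable start slot and in-loop appends, B collects the unquoted paren events, computes the depth profile's 0->1 and 1->0 crossing indices as two lists, and builds the result as a comprehension over their zip.
import Mathlib
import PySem

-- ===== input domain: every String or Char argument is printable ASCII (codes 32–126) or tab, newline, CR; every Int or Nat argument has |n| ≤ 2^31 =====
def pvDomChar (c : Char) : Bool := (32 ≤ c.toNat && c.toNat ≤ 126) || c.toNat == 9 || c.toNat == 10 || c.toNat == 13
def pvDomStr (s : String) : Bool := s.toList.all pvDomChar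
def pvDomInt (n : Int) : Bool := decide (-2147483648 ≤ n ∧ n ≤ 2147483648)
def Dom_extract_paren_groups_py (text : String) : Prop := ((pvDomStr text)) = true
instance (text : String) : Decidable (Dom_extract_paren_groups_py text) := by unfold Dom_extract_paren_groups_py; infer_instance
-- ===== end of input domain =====

-- B replaces A's interleaved start/append state machine by event collection + depth-crossing lists paired by zip; objective: alternative.

-- quote-flag update shared verbatim by both Pythons: toggle the matching flag (elif chain)
def pvQuoteStep (ch : Char) (q : Bool × Bool × Bool) : Bool × Bool × Bool :=
  if ch = '\'' ∧ q.2.1 = false ∧ q.2.2 = false then (!q.1, q.2.1, q.2.2)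
  else if ch = '"' ∧ q.1 = false ∧ q.2.2 = false then (q.1, !q.2.1, q.2.2)
  else if ch = '`' ∧ q.1 = false ∧ q.2.1 = false then (q.1, q.2.1, !q.2.2)
  else q

-- ===== PORT A =====
def pvALoop (full : List Char) : List Char → Nat → Int → Int → (Bool × Bool × Bool) → List String → List String
  | [], _, _, _, _, groups => groups
  | ch :: rest, idx, depth, start, q, groups =>
    let q' := pvQuoteStep ch q
    if q'.1 = true ∨ q'.2.1 = true ∨ q'.2.2 = true then
      pvALoop full rest (idx + 1) depth start q' groups
    else if ch = '(' then
      pvALoop full rest (idx + 1) (depth + 1) (if depth = 0 then (idx : Int) + 1 else start) q' groups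
    else if ch = ')' then
      if depth - 1 = 0 ∧ start ≥ 0 then
        pvALoop full rest (idx + 1) (depth - 1) (-1) q'
          (groups ++ [String.ofList (PySem.List.slice full (some start) (some (idx : Int)))])
      else
        pvALoop full rest (idx + 1) (depth - 1) start q' groups
    else
      pvALoop full rest (idx + 1) depth start q' groups

def extract_paren_groups_py (text : String) : List String :=
  pvALoop text.toList text.toList 0 0 (-1) (false, false, false) []

-- ===== PORT B =====
-- pass 1: unquoted paren events (index, ±1)
def pvEvents : List Char → Nat → (Bool × Bool × Bool) → List (Nat × Int)
  | [], _, _ => []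
  | ch :: rest, idx, q =>
    let q' := pvQuoteStep ch q
    if q'.1 = true ∨ q'.2.1 = true ∨ q'.2.2 = true then pvEvents rest (idx + 1) q'
    else if ch = '(' then (idx, 1) :: pvEvents rest (idx + 1) q'
    else if ch = ')' then (idx, -1) :: pvEvents rest (idx + 1) q'
    else pvEvents rest (idx + 1) q'

-- pass 2 step: record a 0→1 crossing as an opener, a 1→0 crossing as a closer
def pvCrossStep (st : List Nat × List Nat × Int) (e : Nat × Int) : List Nat × List Nat × Int :=
  let os := if e.2 = 1 ∧ st.2.2 = 0 then st.1 ++ [e.1] else st.1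
  let d := st.2.2 + e.2
  let cs := if e.2 = -1 ∧ d = 0 then st.2.1 ++ [e.1] else st.2.1
  (os, cs, d)

def extract_paren_groups_py_alt (text : String) : List String :=
  let full := text.toList
  let r := (pvEvents full 0 (false, false, false)).foldl pvCrossStep ([], [], 0)
  (r.1.zip r.2.1).map (fun p => String.ofList (PySem.List.slice full (some ((p.1 : Int) + 1)) (some (p.2 : Int))))

-- ===== PRECONDITION & SPEC =====
def Spec_extract_paren_groups_py (text : String) (out : List String) : Prop := out = extract_paren_groups_py_alt text
instance (text : String) (out : List String) : Decidable (Spec_extract_paren_groups_py text out) := by unfold Spec_extract_paren_groups_py; infer_instance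

-- ===== CLAIM (what is proved, stated in full; the proofs are below) =====
def Claim_equal_extract_paren_groups_py : Prop := ∀ (text : String), Dom_extract_paren_groups_py text → Spec_extract_paren_groups_py text (extract_paren_groups_py text)

-- ===== LEMMAS AND PROOFS =====

-- cons-producing form of B's crossing fold
def pvCrossR : List (Nat × Int) → Int → List Nat × List Nat
  | [], _ => ([], [])
  | (i, δ) :: es, d =>
    let r := pvCrossR es (d + δ)
    ((if δ = 1 ∧ d = 0 then i :: r.1 else r.1), (if δ = -1 ∧ d + δ = 0 then i :: r.2 else r.2))

-- A's paren logic, expressed on the event list: (start, closeIdx) pairs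
def pvPairUp : List (Nat × Int) → Int → Int → List (Int × Nat)
  | [], _, _ => []
  | (i, δ) :: es, d, s =>
    if δ = 1 then pvPairUp es (d + 1) (if d = 0 then (i : Int) + 1 else s)
    else if δ = -1 then
      if d - 1 = 0 ∧ s ≥ 0 then (s, i) :: pvPairUp es (d - 1) (-1)
      else pvPairUp es (d - 1) s
    else pvPairUp es (d + δ) s

lemma pvCross_foldl (es : List (Nat × Int)) :
    ∀ (os cs : List Nat) (d : Int),
      (es.foldl pvCrossStep (os, cs, d)).1 = os ++ (pvCrossR es d).1 ∧
      (es.foldl pvCrossStep (os, cs, d)).2.1 = cs ++ (pvCrossR es d).2 := by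
  induction es with
  | nil => intro os cs d; simp [pvCrossR]
  | cons e es ih =>
    obtain ⟨i, δ⟩ := e
    intro os cs d
    simp only [List.foldl_cons, pvCrossStep, pvCrossR]
    obtain ⟨h1, h2⟩ := ih (if δ = 1 ∧ d = 0 then os ++ [i] else os)
      (if δ = -1 ∧ d + δ = 0 then cs ++ [i] else cs) (d + δ)
    constructor
    · rw [h1]; split_ifs <;> simp
    · rw [h2]; split_ifs <;> simp

lemma pvALoop_pairUp (full : List Char) (rest : List Char) :
    ∀ (idx : Nat) (depth start : Int) (q : Bool × Bool × Bool) (groups : List String),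
    pvALoop full rest idx depth start q groups =
      groups ++ (pvPairUp (pvEvents rest idx q) depth start).map
        (fun p => String.ofList (PySem.List.slice full (some p.1) (some (p.2 : Int)))) := by
  induction rest with
  | nil => intro idx depth start q groups; simp [pvALoop, pvEvents, pvPairUp]
  | cons ch rest ih =>
    intro idx depth start q groups
    simp only [pvALoop, pvEvents]
    by_cases hq : (pvQuoteStep ch q).1 = true ∨ (pvQuoteStep ch q).2.1 = true ∨ (pvQuoteStep ch q).2.2 = true
    · simp only [if_pos hq]; exact ih ..
    · simp only [if_neg hq]
      by_cases h1 : ch = '('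
      · simp only [if_pos h1, pvPairUp]; exact ih ..
      · simp only [if_neg h1]
        by_cases h2 : ch = ')'
        · simp only [if_pos h2, pvPairUp]
          norm_num
          by_cases h3 : depth - 1 = 0 ∧ start ≥ 0
          · simp only [if_pos h3, List.map_cons]
            rw [ih]
            simp
          · simp only [if_neg h3]; exact ih ..
        · simp only [if_neg h2]; exact ih ..

-- events produced by the quote pass are all ±1
lemma pvEvents_deltas (rest : List Char) :
    ∀ (idx : Nat) (q : Bool × Bool × Bool), ∀ e ∈ pvEvents rest idx q, e.2 = 1 ∨ e.2 = -1 := by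
  induction rest with
  | nil => intro idx q e he; simp [pvEvents] at he
  | cons ch rest ih =>
    intro idx q e he
    simp only [pvEvents] at he
    split_ifs at he with hq h1 h2
    · exact ih _ _ e he
    · rcases List.mem_cons.mp he with h | h
      · left; rw [h]
      · exact ih _ _ e h
    · rcases List.mem_cons.mp he with h | h
      · right; rw [h]
      · exact ih _ _ e h
    · exact ih _ _ e he

-- the bridge: A's pairing equals the zip of crossing lists
lemma pvPairUp_cross (es : List (Nat × Int)) :
    ∀ (d s : Int), (∀ e ∈ es, e.2 = 1 ∨ e.2 = -1) → (d ≤ 0 ∨ s ≥ 0) →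
      pvPairUp es d s =
        (if d ≤ 0 then
          ((pvCrossR es d).1.zip (pvCrossR es d).2).map (fun p => ((p.1 : Int) + 1, p.2))
        else
          match (pvCrossR es d).2 with
          | [] => []
          | c :: cs => (s, c) :: ((pvCrossR es d).1.zip cs).map (fun p => ((p.1 : Int) + 1, p.2))) := by
  induction es with
  | nil =>
    intro d s _ _
    simp only [pvPairUp, pvCrossR]
    split_ifs with h
    · simp
    · simp
  | cons e es ih =>
    obtain ⟨i, δ⟩ := e
    intro d s hδ hds
    have hδi : δ = 1 ∨ δ = -1 := hδ (i, δ) (List.mem_cons_self ..)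
    have hδes : ∀ e ∈ es, e.2 = 1 ∨ e.2 = -1 := fun e he => hδ e (List.mem_cons_of_mem _ he)
    rcases hδi with h | h
    · -- opener event
      subst h
      simp only [pvPairUp, pvCrossR]
      norm_num
      by_cases hd : d = 0
      · subst hd
        norm_num
        rw [ih 1 ((i : Int) + 1) hδes (Or.inr (by omega))]
        norm_num
        cases hcs : (pvCrossR es 1).2 with
        | nil => simp
        | cons c cs => simp
      · by_cases hd1 : d ≤ 0
        · -- d ≤ -1
          have hd' : d + 1 ≤ 0 := by omega
          rw [if_neg hd, ih (d + 1) s hδes (Or.inl hd')]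
          simp only [if_pos hd1, if_pos hd', if_neg hd]
        · -- d ≥ 1, s ≥ 0
          have hs : s ≥ 0 := by rcases hds with h | h; omega; exact h
          have hd' : ¬ d + 1 ≤ 0 := by omega
          rw [if_neg hd, ih (d + 1) s hδes (Or.inr hs)]
          simp only [if_neg hd1, if_neg hd', if_neg hd]
    · -- closer event
      subst h
      simp only [pvPairUp, pvCrossR]
      norm_num
      have e1 : d + -1 = d - 1 := by ring
      rw [e1]
      by_cases hd : d = 1
      · subst hd
        have hs : s ≥ 0 := by rcases hds with h | h; omega; exact h
        norm_num [hs]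
        rw [ih 0 (-1) hδes (Or.inl le_rfl)]
        norm_num
      · by_cases hd1 : d ≤ 0
        · have hng : ¬ (d - 1 = 0 ∧ s ≥ 0) := by omega
          rw [if_neg hng, ih (d - 1) s hδes (Or.inl (by omega))]
          simp only [if_pos hd1, if_pos (show d - 1 ≤ 0 by omega), if_neg (show ¬ d - 1 = 0 by omega)]
        · -- d ≥ 2, s ≥ 0
          have hs : s ≥ 0 := by rcases hds with h | h; omega; exact h
          have hng : ¬ (d - 1 = 0 ∧ s ≥ 0) := by omega
          rw [if_neg hng, ih (d - 1) s hδes (Or.inr hs)]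
          simp only [if_neg hd1, if_neg (show ¬ d - 1 ≤ 0 by omega), if_neg (show ¬ d - 1 = 0 by omega)]

-- ===== VERDICT (by name: the statement is the Claim_ definition above) =====
theorem extract_paren_groups_py_spec : Claim_equal_extract_paren_groups_py := by
  intro text _
  unfold Spec_extract_paren_groups_py extract_paren_groups_py extract_paren_groups_py_alt
  rw [pvALoop_pairUp]
  rw [pvPairUp_cross _ 0 (-1) (pvEvents_deltas text.toList 0 (false, false, false)) (Or.inl le_rfl)]
  simp only [if_pos (le_refl (0 : Int)), List.nil_append]
  obtain ⟨h1, h2⟩ := pvCross_foldl (pvEvents text.toList 0 (false, false, false)) [] [] 0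
  simp only [h1, h2]
  simp [List.map_map, Function.comp]
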